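-- pv_equiv track=rewrite | github.com/zouharvi/mff-student | language_data_resources/haiku/haiku.py | computeHaiku
-- ===== SOURCE A (Python) =====
-- def countSyllables(raw):
--     raw = f' {raw} '
--     # naively counts the number of syllables in a string
--     syllables = 0
--     for syllable in ['a', 'e', 'i', 'y', 'o', 'u', 'ě', 'á', 'ý', 'í', 'é', 'ú']:
--         syllables += raw.count(syllable)
--     # diphthongs
--     for syllable in ['ou', 'au']:
--         syllables -= raw.count(syllable)
--     # standalone words
--     for word in ['z', 's', 'v']:
--         syllables += raw.count(f' {word} ')
--     return syllables
--
-- def syllableSignature(sentence):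
--     # count syllables per word
--     words = sentence.split(' ')
--     return list(map(countSyllables, words))
--
-- def computeHaiku(sentence):
--     # returns False if it is not a haiku
--     # returns a triplet of word indicies, where lines should end
--     signature = syllableSignature(sentence)
--
--     def eatTokens(i, x):
--         counter = 0
--         while counter < x:
--             if i >= len(signature):
--                 return False
--             counter += signature[i]
--             i+=1
--         return i
--
--     # first line
--     i = eatTokens(0, 5)
--     a = i
--
--     # second line
--     i = eatTokens(i, 7)
--     b = i
--
--     # third line
--     i = eatTokens(i, 5)
--     c = i
--
--     if not (a and b and c):
--         return False
--     return [a, b, c]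
-- ===== SOURCE B (Python) =====
-- def countSyllables(raw):
--     raw = f' {raw} '
--     # naively counts the number of syllables in a string
--     syllables = 0
--     for syllable in ['a', 'e', 'i', 'y', 'o', 'u', 'ě', 'á', 'ý', 'í', 'é', 'ú']:
--         syllables += raw.count(syllable)
--     # diphthongs
--     for syllable in ['ou', 'au']:
--         syllables -= raw.count(syllable)
--     # standalone words
--     for word in ['z', 's', 'v']:
--         syllables += raw.count(f' {word} ')
--     return syllables
--
-- def syllableSignature(sentence):
--     # count syllables per word
--     words = sentence.split(' ')
--     return list(map(countSyllables, words))
--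
-- def computeHaiku(sentence):
--     # prefix-sum reformulation: build cumulative syllable counts once,
--     # then locate each line break as the first prefix reaching its threshold
--     signature = syllableSignature(sentence)
--     prefix = []
--     total = 0
--     for v in signature:
--         total += v
--         prefix.append(total)
--
--     def findBreak(start, base, need):
--         for j in range(start, len(prefix)):
--             if prefix[j] >= base + need:
--                 return j + 1
--         return None
--
--     a = findBreak(0, 0, 5)
--     if a is None:
--         return False
--     b = findBreak(a, prefix[a - 1], 7)
--     if b is None:
--         return False
--     c = findBreak(b, prefix[b - 1], 5)
--     if c is None:
--         return False
--     return [a, b, c]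
-- ===== Notes on version B (the rewrite author's own statement) =====
-- stated objective: alternative
-- what changed: computeHaiku is reorganized around a prefix-sum array built in one pass: each line break is the first index whose cumulative syllable count reaches its threshold (5, prev+7, prev+5), replacing the stateful eatTokens counter loops restarted per line.
import Mathlib
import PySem

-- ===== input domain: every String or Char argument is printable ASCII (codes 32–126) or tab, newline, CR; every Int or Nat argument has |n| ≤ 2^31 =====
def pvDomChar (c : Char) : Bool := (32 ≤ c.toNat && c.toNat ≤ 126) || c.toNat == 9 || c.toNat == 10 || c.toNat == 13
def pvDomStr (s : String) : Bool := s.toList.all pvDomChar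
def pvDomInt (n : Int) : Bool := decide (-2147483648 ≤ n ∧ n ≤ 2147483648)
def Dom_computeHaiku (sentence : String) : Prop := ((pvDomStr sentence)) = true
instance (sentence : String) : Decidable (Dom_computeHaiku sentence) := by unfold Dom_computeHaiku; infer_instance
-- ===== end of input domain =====

-- Program equivalence: computeHaiku (5-7-5 haiku break detection).
-- B replaces A's per-line eatTokens counter loops by a single prefix-sum pass plus
-- first-index-reaching-threshold scans (alternative decomposition, same cost).
-- B's Python returns A's exact value everywhere (the break-index list on a haiku,
-- False otherwise); under the required Bool signature both ports render the truthy
-- list case as `true`, and the equivalence is proved on ALL inputs (no Pre_).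


-- ===== PORT A =====
-- shared module helpers (used verbatim by both Python versions)
def countSyllables (raw : String) : Int :=
  let raw := " " ++ raw ++ " "
  let s1 := ["a", "e", "i", "y", "o", "u", "ě", "á", "ý", "í", "é", "ú"].foldl
      (fun acc syl => acc + (PySem.Str.count raw syl : Int)) 0
  let s2 := ["ou", "au"].foldl (fun acc syl => acc - (PySem.Str.count raw syl : Int)) s1
  ["z", "s", "v"].foldl (fun acc w => acc + (PySem.Str.count raw (" " ++ w ++ " ") : Int)) s2

def syllableSignature (sentence : String) : List Int :=
  ((PySem.Str.split? sentence " ").getD []).map countSyllables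

-- A's eatTokens: while counter < x: bounds check, add signature[i], i += 1.
-- Python's `return False` becomes `none`; the index access signature[i] is in range (guarded).
def eatTokens (sig : List Int) (i : Nat) (counter x : Int) : Option Nat :=
  if counter < x then
    if h : i < sig.length then eatTokens sig (i + 1) (counter + sig[i]) x
    else none
  else some i
termination_by sig.length - i
decreasing_by omega

-- A returns the list [a,b,c] (truthy → true under the Bool signature) iff all three
-- eatTokens calls return an index; `return False` is `false`. Python coerces a False
-- intermediate to 0 when fed back into eatTokens: `.getD 0`.
def computeHaiku (sentence : String) : Bool :=
  let signature := syllableSignature sentence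
  let a := eatTokens signature 0 0 5
  let b := eatTokens signature (a.getD 0) 0 7
  let c := eatTokens signature (b.getD 0) 0 5
  a.isSome && b.isSome && c.isSome

-- ===== PORT B =====
-- prefix list built by one pass (Python: append running total)
def prefixSums (sig : List Int) : List Int :=
  (sig.foldl (fun (acc : List Int × Int) v =>
    let total := acc.2 + v
    (acc.1 ++ [total], total)) ([], 0)).1

-- first j in [start, len) with prefix[j] >= base + need, returning j+1
def findBreak (pref : List Int) (start : Nat) (base need : Int) : Option Nat :=
  if h : start < pref.length then
    if pref[start] ≥ base + need then some (start + 1)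
    else findBreak pref (start + 1) base need
  else none
termination_by pref.length - start
decreasing_by omega

-- B returns [a,b,c] (truthy → true under the Bool signature) or False (→ false);
-- prefix[a-1] / prefix[b-1] are in-range accesses (a,b ≥ 1, ≤ len), rendered with getD.
def computeHaiku_alt (sentence : String) : Bool :=
  let signature := syllableSignature sentence
  let pref := prefixSums signature
  match findBreak pref 0 0 5 with
  | none => false
  | some a =>
    match findBreak pref a (pref.getD (a - 1) 0) 7 with
    | none => false
    | some b =>
      match findBreak pref b (pref.getD (b - 1) 0) 5 with
      | none => false
      | some _ => true

-- ===== PRECONDITION & SPEC =====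
-- A is total (no Pre_).
def Spec_computeHaiku (sentence : String) (out : Bool) : Prop := out = computeHaiku_alt sentence
instance (sentence : String) (out : Bool) : Decidable (Spec_computeHaiku sentence out) := by unfold Spec_computeHaiku; infer_instance

-- ===== CLAIM (what is proved, stated in full; the proofs are below) =====
def Claim_equal_computeHaiku : Prop := ∀ (sentence : String), Dom_computeHaiku sentence → Spec_computeHaiku sentence (computeHaiku sentence)

-- ===== LEMMAS AND PROOFS =====

-- running sums of sig starting from s (specification form of prefixSums)
def runSums (s : Int) : List Int → List Int
  | [] => []
  | v :: tl => (s + v) :: runSums (s + v) tl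

lemma foldl_prefix_eq (sig : List Int) : ∀ (l : List Int) (s : Int),
    (sig.foldl (fun (acc : List Int × Int) v =>
      let total := acc.2 + v
      (acc.1 ++ [total], total)) (l, s)).1 = l ++ runSums s sig := by
  induction sig with
  | nil => intro l s; simp [runSums]
  | cons v tl ih => intro l s; simp [List.foldl, runSums, ih]

lemma prefixSums_eq_runSums (sig : List Int) : prefixSums sig = runSums 0 sig := by
  simpa using foldl_prefix_eq sig [] 0

lemma runSums_length (sig : List Int) : ∀ s, (runSums s sig).length = sig.length := by
  induction sig with
  | nil => intro s; simp [runSums]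
  | cons v tl ih => intro s; simp [runSums, ih]

lemma sum_take_succ (sig : List Int) (i : Nat) (h : i < sig.length) :
    (sig.take (i + 1)).sum = (sig.take i).sum + sig[i] := by
  rw [List.take_add_one, List.sum_append]
  simp [List.getElem?_eq_getElem h]

lemma runSums_get (sig : List Int) : ∀ (s : Int) (j : Nat) (h : j < (runSums s sig).length),
    (runSums s sig)[j] = s + (sig.take (j + 1)).sum := by
  induction sig with
  | nil => intro s j h; simp [runSums] at h
  | cons v tl ih =>
    intro s j h
    cases j with
    | zero => simp [runSums]
    | succ j =>
      have h' : j < (runSums (s + v) tl).length := by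
        simpa [runSums] using h
      simp only [runSums, List.getElem_cons_succ]
      rw [ih (s + v) j h']
      simp [List.sum_cons, add_assoc]

lemma prefixSums_length (sig : List Int) : (prefixSums sig).length = sig.length := by
  rw [prefixSums_eq_runSums]; exact runSums_length sig 0

lemma prefixSums_get (sig : List Int) (j : Nat) (h : j < (prefixSums sig).length) :
    (prefixSums sig)[j] = (sig.take (j + 1)).sum := by
  have h' : j < (runSums 0 sig).length := by rwa [prefixSums_eq_runSums] at h
  have := runSums_get sig 0 j h'
  simp only [prefixSums_eq_runSums]
  omega

-- the central correspondence: A's counter loop is B's first-threshold scan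
lemma eat_eq_find (sig : List Int) (i : Nat) (c x : Int) (hcx : c < x) :
    eatTokens sig i c x = findBreak (prefixSums sig) i ((sig.take i).sum - c) x := by
  rw [eatTokens, if_pos hcx]
  by_cases h : i < sig.length
  · have hp : i < (prefixSums sig).length := by rw [prefixSums_length]; exact h
    rw [dif_pos h, findBreak, dif_pos hp, prefixSums_get sig i hp, sum_take_succ sig i h]
    by_cases h2 : c + sig[i] < x
    · rw [if_neg (by omega)]
      have hbase : (sig.take (i + 1)).sum - (c + sig[i]) = (sig.take i).sum - c := by
        rw [sum_take_succ sig i h]; ring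
      rw [eat_eq_find sig (i + 1) (c + sig[i]) x h2, hbase]
    · rw [if_pos (by omega), eatTokens, if_neg h2]
  · have hp : ¬ i < (prefixSums sig).length := by rw [prefixSums_length]; exact h
    rw [dif_neg h, findBreak, dif_neg hp]
termination_by sig.length - i
decreasing_by omega

lemma findBreak_some (pref : List Int) (start : Nat) (base need : Int) (r : Nat)
    (h : findBreak pref start base need = some r) :
    ∃ j, r = j + 1 ∧ j < pref.length ∧ start ≤ j := by
  rw [findBreak] at h
  by_cases hs : start < pref.length
  · rw [dif_pos hs] at h
    by_cases hc : pref[start] ≥ base + need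
    · rw [if_pos hc] at h
      exact ⟨start, (Option.some.inj h).symm, hs, le_refl _⟩
    · rw [if_neg hc] at h
      obtain ⟨j, h1, h2, h3⟩ := findBreak_some pref (start + 1) base need r h
      exact ⟨j, h1, h2, by omega⟩
  · rw [dif_neg hs] at h; cases h
termination_by pref.length - start
decreasing_by omega

lemma getElem?_prefixSums (sig : List Int) (j : Nat) (h : j < (prefixSums sig).length) :
    (prefixSums sig)[j]? = some ((sig.take (j + 1)).sum) := by
  rw [List.getElem?_eq_getElem h, prefixSums_get sig j h]

-- A = B as Bool on every input
lemma ports_agree (sentence : String) : computeHaiku sentence = computeHaiku_alt sentence := by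
  unfold computeHaiku computeHaiku_alt
  simp only []
  set sig := syllableSignature sentence with hsig
  have e1 : eatTokens sig 0 0 5 = findBreak (prefixSums sig) 0 0 5 := by
    simpa using eat_eq_find sig 0 0 5 (by norm_num)
  cases hA : findBreak (prefixSums sig) 0 0 5 with
  | none => simp [e1, hA]
  | some a =>
    obtain ⟨j, rfl, hj, -⟩ := findBreak_some _ _ _ _ _ hA
    have hb : (prefixSums sig)[j]? = some ((sig.take (j + 1)).sum) :=
      getElem?_prefixSums sig j hj
    have e2 : eatTokens sig (j + 1) 0 7
        = findBreak (prefixSums sig) (j + 1) ((sig.take (j + 1)).sum) 7 := by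
      simpa using eat_eq_find sig (j + 1) 0 7 (by norm_num)
    cases hB : findBreak (prefixSums sig) (j + 1) ((sig.take (j + 1)).sum) 7 with
    | none => simp [e1, hA, hb, e2, hB]
    | some b =>
      obtain ⟨j2, rfl, hj2, -⟩ := findBreak_some _ _ _ _ _ hB
      have hb2 : (prefixSums sig)[j2]? = some ((sig.take (j2 + 1)).sum) :=
        getElem?_prefixSums sig j2 hj2
      have e3 : eatTokens sig (j2 + 1) 0 5
          = findBreak (prefixSums sig) (j2 + 1) ((sig.take (j2 + 1)).sum) 5 := by
        simpa using eat_eq_find sig (j2 + 1) 0 5 (by norm_num)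
      cases hC : findBreak (prefixSums sig) (j2 + 1) ((sig.take (j2 + 1)).sum) 5 with
      | none => simp [e1, hA, hb, e2, hB, hb2, e3, hC]
      | some c => simp [e1, hA, hb, e2, hB, hb2, e3, hC]

-- ===== VERDICT (by name: the statement is the Claim_ definition above) =====
theorem computeHaiku_spec : Claim_equal_computeHaiku := by
  intro sentence _
  exact ports_agree sentence
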